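-- pv_equiv track=rewrite | github.com/johith9381/git_profile_analyser | app.py | technology_evolution
-- ===== SOURCE A (Python) =====
-- def technology_evolution(repos):
--     # Sort repos by creation date
--     sorted_repos = sorted(
--         [r for r in repos if r.get("created_at") and r.get("language")],
--         key=lambda x: x["created_at"]
--     )
--     timeline = []
--     seen_langs = set()
--     for r in sorted_repos:
--         lang = r.get("language")
--         if lang and lang not in seen_langs:
--             date_str = r["created_at"].split("T")[0]
--             year = date_str.split("-")[0]
--             timeline.append({"year": year, "language": lang, "repo": r.get("name")})
--             seen_langs.add(lang)
--     return timeline[:5]  # Limit to 5 key milestones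
-- ===== SOURCE B (Python) =====
-- def technology_evolution(repos):
--     # Different decomposition: dedup the languages of the date-sorted qualifying
--     # repos (dict.fromkeys keeps first occurrences), then re-find each language's
--     # first repo, instead of one pass with a seen-set accumulator.
--     qualifying = sorted(
--         (r for r in repos if r.get("created_at") and r.get("language")),
--         key=lambda r: r["created_at"]
--     )
--     langs = list(dict.fromkeys(r["language"] for r in qualifying))
--     timeline = []
--     for lang in langs[:5]:
--         first = next(x for x in qualifying if x["language"] == lang)
--         year = first["created_at"].split("T")[0].split("-")[0]
--         timeline.append({"year": year, "language": lang, "repo": first.get("name")})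
--     return timeline
-- ===== Notes on version B (the rewrite author's own statement) =====
-- stated objective: alternative
-- what changed: A makes one pass over the sorted qualifying repos with a seen-set accumulator appending on each new language; B instead dedups the language column of the sorted list (dict.fromkeys), takes the first 5 languages, and re-scans the list to find each language's first repo.
import Mathlib
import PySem

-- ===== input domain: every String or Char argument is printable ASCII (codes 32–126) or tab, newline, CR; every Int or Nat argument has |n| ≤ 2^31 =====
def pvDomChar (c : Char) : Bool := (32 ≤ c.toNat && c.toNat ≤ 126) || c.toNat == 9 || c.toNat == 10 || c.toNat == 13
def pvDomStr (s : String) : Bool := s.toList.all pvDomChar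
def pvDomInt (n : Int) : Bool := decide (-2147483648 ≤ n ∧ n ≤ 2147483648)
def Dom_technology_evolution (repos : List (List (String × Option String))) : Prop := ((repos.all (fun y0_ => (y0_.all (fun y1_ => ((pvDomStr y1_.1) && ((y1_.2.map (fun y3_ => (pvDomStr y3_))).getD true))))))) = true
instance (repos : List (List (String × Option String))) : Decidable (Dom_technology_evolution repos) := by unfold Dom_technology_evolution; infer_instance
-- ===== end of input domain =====

-- B replaces A's single pass with a seen-set accumulator by a dedup of the languages
-- of the date-sorted qualifying repos followed by a per-language re-scan (objective: alternative).


-- shared helpers (both Pythons use the same expressions)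
-- r.get(k): first-match lookup, None for a missing key or a stored None
def pvGet (r : List (String × Option String)) (k : String) : Option String :=
  ((PySem.Dict.mk r).get? k).getD none

-- Python truthiness of r.get(k): a present, non-empty string
def pvTruthy (v : Option String) : Bool :=
  match v with
  | some s => !(s == "")
  | none => false

-- c.split("T")[0].split("-")[0]; the [0] of a split is total (split never returns [])
def pvYear (c : String) : String :=
  PySem.List.pyGetD (PySem.Chars.splitOn (PySem.List.pyGetD (PySem.Chars.splitOn c.toList "T".toList) 0 []) "-".toList) 0 [] |> String.ofList

def pvQual (r : List (String × Option String)) : Bool :=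
  pvTruthy (pvGet r "created_at") && pvTruthy (pvGet r "language")

-- the dict {"year": …, "language": …, "repo": …} built for repo r
-- ("repo": r.get("name") — Pre_ guarantees the name is a present string)
def pvEmit (r : List (String × Option String)) : List (String × String) :=
  [("year", pvYear ((pvGet r "created_at").getD "")),
   ("language", (pvGet r "language").getD ""),
   ("repo", (pvGet r "name").getD "")]

-- ===== PORT A =====
def technology_evolution (repos : List (List (String × Option String))) : List (List (String × String)) :=
  let sorted_repos := PySem.List.sorted (repos.filter pvQual) (fun r => (pvGet r "created_at").getD "") false
  let st := sorted_repos.foldl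
    (fun (st : List (List (String × String)) × PySem.Set String) r =>
      let lang := pvGet r "language"
      if pvTruthy lang && !(st.2.contains (lang.getD "")) then
        (st.1 ++ [pvEmit r], st.2.add (lang.getD ""))
      else st)
    ([], PySem.Set.empty)
  PySem.List.slice st.1 none (some 5)

-- ===== PORT B =====
def technology_evolution_alt (repos : List (List (String × Option String))) : List (List (String × String)) :=
  let qualifying := PySem.List.sorted (repos.filter pvQual) (fun r => (pvGet r "created_at").getD "") false
  let langs := PySem.List.dedup (qualifying.map (fun r => (pvGet r "language").getD ""))
  (PySem.List.slice langs none (some 5)).map (fun lang =>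
    match qualifying.find? (fun x => (pvGet x "language").getD "" == lang) with
    | some first => [("year", pvYear ((pvGet first "created_at").getD "")),
                     ("language", lang),
                     ("repo", (pvGet first "name").getD "")]
    | none => [])   -- unreachable: every lang comes from qualifying

-- ===== PRECONDITION & SPEC =====
-- Pre_ excludes inputs where a qualifying repo lacks a string "name": there A's
-- "repo" entry is Python None, not a value of the declared String type.
def Pre_technology_evolution (repos : List (List (String × Option String))) : Prop :=
  ∀ r ∈ repos, pvQual r = true → (pvGet r "name").isSome = true

instance (repos : List (List (String × Option String))) : Decidable (Pre_technology_evolution repos) := by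
  unfold Pre_technology_evolution; infer_instance

def pvWitness_technology_evolution : (List (List (String × Option String))) :=
  [[("created_at", some "2021-03-04T05:06:07Z"), ("language", some "Python"), ("name", some "repo1")],
   [("created_at", some "2019-01-02T03:04:05Z"), ("language", some "C"), ("name", some "repo2")]]

def Spec_technology_evolution (repos : List (List (String × Option String))) (out : List (List (String × String))) : Prop := out = technology_evolution_alt repos
instance (repos : List (List (String × Option String))) (out : List (List (String × String))) : Decidable (Spec_technology_evolution repos out) := by unfold Spec_technology_evolution; infer_instance

-- ===== CLAIM (what is proved, stated in full; the proofs are below) =====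
def Claim_equal_technology_evolution : Prop := ∀ (repos : List (List (String × Option String))), Dom_technology_evolution repos → Pre_technology_evolution repos → Spec_technology_evolution repos (technology_evolution repos)

-- ===== LEMMAS AND PROOFS =====

-- the language string of a repo
def pvLang (r : List (String × Option String)) : String := (pvGet r "language").getD ""

-- recursive description of A's seen-set loop: the emitted records
def pvSpec (l : List (List (String × Option String))) (seen : PySem.Set String) :
    List (List (String × String)) :=
  match l with
  | [] => []
  | r :: t =>
    if seen.contains (pvLang r) then pvSpec t seen
    else pvEmit r :: pvSpec t (seen.add (pvLang r))

-- recursive description of the languages A emits (= B's dedup, relative to seen)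
def pvSpecL (l : List (List (String × Option String))) (seen : PySem.Set String) : List String :=
  match l with
  | [] => []
  | r :: t =>
    if seen.contains (pvLang r) then pvSpecL t seen
    else pvLang r :: pvSpecL t (seen.add (pvLang r))

-- B's per-language record builder (the body of B's map)
def pvFindRec (l : List (List (String × Option String))) (lang : String) : List (String × String) :=
  match l.find? (fun x => (pvGet x "language").getD "" == lang) with
  | some first => [("year", pvYear ((pvGet first "created_at").getD "")),
                   ("language", lang),
                   ("repo", (pvGet first "name").getD "")]
  | none => []

theorem pvSlice5 {α : Type} (xs : List α) :
    PySem.List.slice xs none (some 5) = xs.take 5 := by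
  simpa using PySem.List.slice_to xs (b := 5) (by norm_num)

theorem pvSet_add_of_contains {s : PySem.Set String} {x : String}
    (hc : s.contains x = true) : s.add x = s := by
  have h : PySem.Set.add s x = if s.contains x = true then s else s ++ [x] := rfl
  rw [h, if_pos hc]

theorem pvSet_add_of_not_contains {s : PySem.Set String} {x : String}
    (hc : s.contains x = false) : s.add x = s ++ [x] := by
  have h : PySem.Set.add s x = if s.contains x = true then s else s ++ [x] := rfl
  rw [h, if_neg (by rw [hc]; exact Bool.false_ne_true)]

-- contains is membership (PySem.Set is a list of distinct elements)
theorem pvSet_mem_iff_contains {s : PySem.Set String} {x : String} :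
    x ∈ s ↔ s.contains x = true := by
  show x ∈ s ↔ List.contains s x = true
  simp

theorem pvSet_not_mem_of_contains_false {s : PySem.Set String} {x : String}
    (hc : s.contains x = false) : x ∉ s := fun hx => by
  have h := pvSet_mem_iff_contains.mp hx
  rw [hc] at h
  exact Bool.noConfusion h

theorem pvSet_contains_add (s : PySem.Set String) (x y : String) :
    (s.add x).contains y = (s.contains y || y == x) := by
  by_cases hc : s.contains x = true
  · rw [pvSet_add_of_contains hc]
    by_cases hy : (y == x) = true
    · have hyx : y = x := by simpa using hy
      subst hyx
      rw [hc]
      simp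
    · have hy' : (y == x) = false := by simpa using hy
      rw [hy', Bool.or_false]
  · rw [Bool.not_eq_true] at hc
    rw [pvSet_add_of_not_contains hc]
    refine Bool.eq_iff_iff.mpr ?_
    show List.contains (s ++ [x]) y = true ↔ _
    simp [List.mem_append, beq_iff_eq]

theorem pvSpecL_not_seen {l : List (List (String × Option String))}
    {seen : PySem.Set String} {L : String} (h : L ∈ pvSpecL l seen) :
    seen.contains L = false := by
  induction l generalizing seen with
  | nil => simp [pvSpecL] at h
  | cons r t ih =>
    by_cases hc : seen.contains (pvLang r) = true
    · simp only [pvSpecL, hc, if_true] at h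
      exact ih h
    · rw [Bool.not_eq_true] at hc
      simp only [pvSpecL, hc, if_false] at h
      rcases List.mem_cons.mp h with heq | hmem
      · exact heq ▸ hc
      · have := ih hmem
        rw [pvSet_contains_add] at this
        exact (Bool.or_eq_false_iff.mp this).1

-- a language from the tail of the spec never equals the freshly added one
theorem pvSpecL_add_ne {t : List (List (String × Option String))}
    {seen : PySem.Set String} {L x : String} (h : L ∈ pvSpecL t (seen.add x)) : L ≠ x := by
  intro hLx
  have hfalse := pvSpecL_not_seen h
  rw [pvSet_contains_add, hLx] at hfalse
  simp at hfalse

-- A's loop (the truthiness test holds on every element) produces pvSpec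
theorem pvFold_eq_spec (l : List (List (String × Option String)))
    (hq : ∀ r ∈ l, pvQual r = true)
    (acc : List (List (String × String))) (seen : PySem.Set String) :
    (l.foldl
      (fun (st : List (List (String × String)) × PySem.Set String) r =>
        let lang := pvGet r "language"
        if pvTruthy lang && !(st.2.contains (lang.getD "")) then
          (st.1 ++ [pvEmit r], st.2.add (lang.getD ""))
        else st)
      (acc, seen)).1 = acc ++ pvSpec l seen := by
  induction l generalizing acc seen with
  | nil => simp [pvSpec]
  | cons r t ih =>
    have hqr : pvQual r = true := hq r (List.mem_cons_self ..)
    have hqt : ∀ x ∈ t, pvQual x = true := fun x hx => hq x (List.mem_cons_of_mem _ hx)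
    have htr : pvTruthy (pvGet r "language") = true := by
      have h := hqr
      simp only [pvQual, Bool.and_eq_true] at h
      exact h.2
    simp only [List.foldl_cons]
    by_cases hc : seen.contains (pvLang r) = true
    · have hm : ((pvGet r "language").getD "") ∈ seen := pvSet_mem_iff_contains.mpr hc
      have hc' : seen.contains ((pvGet r "language").getD "") = true := hc
      simp only [htr, hc', Bool.not_true, Bool.and_false, if_false]
      rw [ih hqt]
      simp [pvSpec, pvLang, hm]
    · rw [Bool.not_eq_true] at hc
      have hm : ((pvGet r "language").getD "") ∉ seen := pvSet_not_mem_of_contains_false hc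
      have hc' : seen.contains ((pvGet r "language").getD "") = false := hc
      simp only [htr, hc', Bool.not_false, Bool.and_true, if_true]
      rw [ih hqt]
      simp [pvSpec, pvLang, hm]

-- B's ordered dedup of the languages is pvSpecL
theorem pvDedup_eq_specL (l : List (List (String × Option String)))
    (s : PySem.Set String) :
    List.foldl PySem.Set.add s (l.map pvLang) = s ++ pvSpecL l s := by
  induction l generalizing s with
  | nil => simp [pvSpecL]
  | cons r t ih =>
    simp only [List.map_cons, List.foldl_cons]
    by_cases hc : s.contains (pvLang r) = true
    · have hm : pvLang r ∈ s := pvSet_mem_iff_contains.mpr hc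
      rw [pvSet_add_of_contains hc, ih]
      have h2 : pvSpecL (r :: t) s = pvSpecL t s := by simp [pvSpecL, hm]
      rw [h2]
    · rw [Bool.not_eq_true] at hc
      have hm : pvLang r ∉ s := pvSet_not_mem_of_contains_false hc
      have h2 : pvSpecL (r :: t) s = pvLang r :: pvSpecL t (s.add (pvLang r)) := by
        simp [pvSpecL, hm]
      rw [pvSet_add_of_not_contains hc, ih (s ++ [pvLang r]), h2,
          pvSet_add_of_not_contains hc]
      simp

-- each record A emits is recovered by B's find? re-scan
theorem pvSpec_eq_map_find (l : List (List (String × Option String))) (seen : PySem.Set String) :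
    pvSpec l seen = (pvSpecL l seen).map (pvFindRec l) := by
  induction l generalizing seen with
  | nil => simp [pvSpec, pvSpecL]
  | cons r t ih =>
    by_cases hc : seen.contains (pvLang r) = true
    · have hm : pvLang r ∈ seen := pvSet_mem_iff_contains.mpr hc
      have h1 : pvSpec (r :: t) seen = pvSpec t seen := by simp [pvSpec, hm]
      have h2 : pvSpecL (r :: t) seen = pvSpecL t seen := by simp [pvSpecL, hm]
      rw [h1, h2, ih seen]
      apply List.map_congr_left
      intro L hL
      have hne : pvLang r ≠ L := fun h => by
        have hf := pvSpecL_not_seen hL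
        rw [h] at hc; rw [hf] at hc; exact Bool.noConfusion hc
      have hpred : ((pvGet r "language").getD "" == L) = false := by
        simpa [pvLang, beq_iff_eq] using hne
      simp [pvFindRec, List.find?_cons, hpred]
    · rw [Bool.not_eq_true] at hc
      have hm : pvLang r ∉ seen := pvSet_not_mem_of_contains_false hc
      have h1 : pvSpec (r :: t) seen = pvEmit r :: pvSpec t (seen.add (pvLang r)) := by
        simp [pvSpec, hm]
      have h2 : pvSpecL (r :: t) seen = pvLang r :: pvSpecL t (seen.add (pvLang r)) := by
        simp [pvSpecL, hm]
      rw [h1, h2, List.map_cons]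
      have hpredr : ((pvGet r "language").getD "" == pvLang r) = true := by
        simp [pvLang]
      have hhead : pvFindRec (r :: t) (pvLang r) = pvEmit r := by
        simp [pvFindRec, List.find?_cons, hpredr, pvEmit, pvLang]
      rw [hhead, ih (seen.add (pvLang r))]
      congr 1
      apply List.map_congr_left
      intro L hL
      have hne : pvLang r ≠ L := fun h => (pvSpecL_add_ne hL) h.symm
      have hpred : ((pvGet r "language").getD "" == L) = false := by
        simpa [pvLang, beq_iff_eq] using hne
      simp [pvFindRec, List.find?_cons, hpred]

-- ===== VERDICT (by name: the statement is the Claim_ definition above) =====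
theorem technology_evolution_spec : Claim_equal_technology_evolution := by
  intro repos _hdom _hpre
  unfold Spec_technology_evolution technology_evolution technology_evolution_alt
  set l := PySem.List.sorted (repos.filter pvQual) (fun r => (pvGet r "created_at").getD "") false with hl
  have hq : ∀ r ∈ l, pvQual r = true := by
    intro r hr
    rw [hl, PySem.List.mem_sorted] at hr
    exact (List.mem_filter.mp hr).2
  have hA := pvFold_eq_spec l hq [] PySem.Set.empty
  simp only [hA, List.nil_append]
  have hlangs : PySem.List.dedup (l.map (fun r => (pvGet r "language").getD "")) =
      pvSpecL l PySem.Set.empty := by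
    have := pvDedup_eq_specL l PySem.Set.empty
    simpa [PySem.List.dedup, PySem.Set.ofList, PySem.Set.empty, pvLang] using this
  rw [hlangs, pvSpec_eq_map_find l PySem.Set.empty]
  rw [pvSlice5, pvSlice5, ← List.map_take]
  rfl
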